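-- pv_equiv track=rewrite | github.com/Abm32/anukriti_lite | src/allele_caller.py | build_diplotype
-- ===== SOURCE A (Python) =====
-- from typing import Dict, List, Optional, Tuple
--
-- def build_diplotype(allele_counts: Dict[str, int]) -> str:
--     """
--     Build diplotype string from allele copy counts (e.g. {"*2": 1} -> "*1/*2").
--     Assumes diploid; pads with *1 to length 2.
--     """
--     expanded: List[str] = []
--     for star, count in allele_counts.items():
--         expanded.extend([star] * count)
--     while len(expanded) < 2:
--         expanded.append("*1")
--     expanded = sorted(expanded)[:2]
--     return f"{expanded[0]}/{expanded[1]}"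
-- ===== SOURCE B (Python) =====
-- def build_diplotype(allele_counts):
--     """
--     Build diplotype string from allele copy counts (e.g. {"*2": 1} -> "*1/*2").
--     Assumes diploid; pads with *1 to length 2.
--     """
--     counts = {}
--     for star, count in allele_counts.items():
--         if count > 0:
--             counts[star] = counts.get(star, 0) + count
--     total = sum(counts.values())
--     counts["*1"] = counts.get("*1", 0) + max(0, 2 - total)
--     result = []
--     for star in sorted(counts):
--         need = 2 - len(result)
--         if need <= 0:
--             break
--         take = counts[star] if counts[star] < need else need
--         result.extend([star] * take)
--     return f"{result[0]}/{result[1]}"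
-- ===== Notes on version B (the rewrite author's own statement) =====
-- stated objective: alternative
-- what changed: B never materialises the expanded multiset: it builds a positive-count map, folds the *1 padding into that map, and picks the two smallest alleles by scanning the sorted distinct keys with their counts, instead of expanding every count into a flat list, padding it and sorting the whole multiset.
import Mathlib
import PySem

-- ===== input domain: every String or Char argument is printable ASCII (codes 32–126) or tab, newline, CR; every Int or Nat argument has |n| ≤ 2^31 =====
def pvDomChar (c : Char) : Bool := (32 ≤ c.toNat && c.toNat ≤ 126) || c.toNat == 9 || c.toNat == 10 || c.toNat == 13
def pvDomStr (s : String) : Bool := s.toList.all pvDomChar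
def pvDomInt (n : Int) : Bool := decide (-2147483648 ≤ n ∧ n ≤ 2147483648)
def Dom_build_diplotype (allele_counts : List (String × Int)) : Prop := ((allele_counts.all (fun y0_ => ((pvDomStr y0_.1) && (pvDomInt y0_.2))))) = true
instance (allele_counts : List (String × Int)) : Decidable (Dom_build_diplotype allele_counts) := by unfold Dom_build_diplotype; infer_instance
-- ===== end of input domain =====

-- B replaces A's expand-pad-sort of the whole multiset by a positive-count map whose sorted
-- distinct keys are scanned for the two smallest alleles (objective: alternative).

-- ===== PORT A =====
-- while len(expanded) < 2: expanded.append("*1")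
def pvPad (l : List String) : List String :=
  if l.length < 2 then pvPad (l ++ ["*1"]) else l
termination_by 2 - l.length

def build_diplotype (allele_counts : List (String × Int)) : String :=
  let expanded := allele_counts.foldl (fun acc p => acc ++ PySem.List.pyRepeat [p.1] p.2) []
  let expanded := pvPad expanded
  let expanded := (PySem.List.sorted expanded (fun x => x) false).take 2
  -- indices 0 and 1 are in range: the padding guarantees length ≥ 2
  PySem.List.pyGetD expanded 0 "" ++ "/" ++ PySem.List.pyGetD expanded 1 ""

-- ===== PORT B =====
-- for star in sorted(counts): take min(counts[star], need) copies, break when two are collected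
def pvCollect (d : PySem.Dict String Int) : List String → List String → List String
  | [], res => res
  | k :: ks, res =>
    let need : Int := 2 - (res.length : Int)
    if need ≤ 0 then res
    else
      let c := d.getD k 0
      let take := if c < need then c else need
      pvCollect d ks (res ++ PySem.List.pyRepeat [k] take)

def build_diplotype_alt (allele_counts : List (String × Int)) : String :=
  let counts := allele_counts.foldl
    (fun d p => if p.2 > 0 then d.insert p.1 (d.getD p.1 0 + p.2) else d) PySem.Dict.empty
  let total := counts.values.sum
  let counts := counts.insert "*1" (counts.getD "*1" 0 + max 0 (2 - total))
  let result := pvCollect counts (PySem.List.sorted counts.keys (fun x => x) false) []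
  -- indices 0 and 1 are in range: the "*1" padding guarantees two picks
  PySem.List.pyGetD result 0 "" ++ "/" ++ PySem.List.pyGetD result 1 ""

-- ===== PRECONDITION & SPEC =====
def Spec_build_diplotype (allele_counts : List (String × Int)) (out : String) : Prop := out = build_diplotype_alt allele_counts
instance (allele_counts : List (String × Int)) (out : String) : Decidable (Spec_build_diplotype allele_counts out) := by unfold Spec_build_diplotype; infer_instance

-- ===== CLAIM (what is proved, stated in full; the proofs are below) =====
def Claim_equal_build_diplotype : Prop := ∀ (allele_counts : List (String × Int)), Dom_build_diplotype allele_counts → Spec_build_diplotype allele_counts (build_diplotype allele_counts)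

-- ===== LEMMAS AND PROOFS =====

-- the fold step of B's counting loop, and the expansion multiset of A's loop
def pvStep (d : PySem.Dict String Int) (p : String × Int) : PySem.Dict String Int :=
  if p.2 > 0 then d.insert p.1 (d.getD p.1 0 + p.2) else d

def pvExp (ac : List (String × Int)) : List String :=
  ac.flatMap (fun p => List.replicate p.2.toNat p.1)

theorem pv_getD_of_not_mem {d : PySem.Dict String Int} {s : String}
    (h : s ∉ d.keys) : d.getD s 0 = 0 := by
  cases ht : d.contains s with
  | false => exact PySem.Dict.getD_of_not_contains d 0 ht
  | true => exact absurd ((PySem.Dict.contains_iff_mem_keys d s).1 ht) h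

theorem pv_exp_foldl (ac : List (String × Int)) :
    ac.foldl (fun acc p => acc ++ PySem.List.pyRepeat [p.1] p.2) [] = pvExp ac := by
  rw [PySem.List.foldl_append_eq_flatMap]
  simp [pvExp, PySem.List.pyRepeat_singleton]

theorem pv_getD_count (ac : List (String × Int)) (d : PySem.Dict String Int) (s : String) :
    (ac.foldl pvStep d).getD s 0 = d.getD s 0 + ((pvExp ac).count s : Int) := by
  induction ac generalizing d with
  | nil => simp [pvExp]
  | cons p ac ih =>
    rw [List.foldl_cons, ih]
    have hexp : pvExp (p :: ac) = List.replicate p.2.toNat p.1 ++ pvExp ac := by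
      simp [pvExp]
    rw [hexp, List.count_append]
    unfold pvStep
    by_cases hc : p.2 > 0
    · rw [if_pos hc, PySem.Dict.getD_insert]
      by_cases hs : s = p.1
      · subst hs
        simp
        omega
      · rw [if_neg hs]
        have : List.count s (List.replicate p.2.toNat p.1) = 0 := by
          simp [List.count_replicate]
          intro h; exact absurd h.symm hs
        rw [this]; simp
    · rw [if_neg hc]
      have h0 : p.2.toNat = 0 := by omega
      simp [h0]

theorem pv_nodup (ac : List (String × Int)) (d : PySem.Dict String Int)
    (h : d.keys.Nodup) : (ac.foldl pvStep d).keys.Nodup := by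
  induction ac generalizing d with
  | nil => simpa using h
  | cons p ac ih =>
    rw [List.foldl_cons]
    apply ih
    unfold pvStep
    by_cases hc : p.2 > 0
    · rw [if_pos hc]; exact PySem.Dict.nodup_keys_insert _ _ _ h
    · rw [if_neg hc]; exact h

theorem pv_pos (ac : List (String × Int)) (d : PySem.Dict String Int)
    (h : ∀ k ∈ d.keys, 0 < d.getD k 0) :
    ∀ k ∈ (ac.foldl pvStep d).keys, 0 < (ac.foldl pvStep d).getD k 0 := by
  induction ac generalizing d with
  | nil => simpa using h
  | cons p ac ih =>
    rw [List.foldl_cons]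
    apply ih
    intro k hk
    unfold pvStep at hk ⊢
    by_cases hc : p.2 > 0
    · rw [if_pos hc] at hk ⊢
      by_cases he : k = p.1
      · subst he
        rw [PySem.Dict.getD_insert_self]
        by_cases hm : p.1 ∈ d.keys
        · have := h p.1 hm; omega
        · rw [pv_getD_of_not_mem hm]; omega
      · rw [PySem.Dict.getD_insert_of_ne d _ _ he]
        rcases (PySem.Dict.mem_keys_insert _ _ _ _).1 hk with h1 | h2
        · exact absurd h1 he
        · exact h k h2
    · rw [if_neg hc] at hk ⊢
      exact h k hk

theorem pv_mem_keys_iff (ac : List (String × Int)) (s : String) :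
    s ∈ (ac.foldl pvStep PySem.Dict.empty).keys ↔ s ∈ pvExp ac := by
  constructor
  · intro h
    have hpos := pv_pos ac PySem.Dict.empty (by simp) s h
    rw [pv_getD_count] at hpos
    have hc : (0:Int) < ((pvExp ac).count s : Int) := by simpa using hpos
    exact List.count_pos_iff.1 (by exact_mod_cast hc)
  · intro h
    by_contra hnot
    have h0 := pv_getD_of_not_mem hnot
    rw [pv_getD_count] at h0
    simp at h0
    have := List.count_pos_iff.2 h
    omega

theorem pv_total (ac : List (String × Int)) :
    (ac.foldl pvStep PySem.Dict.empty).values.sum = ((pvExp ac).length : Int) := by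
  set d := ac.foldl pvStep PySem.Dict.empty with hd
  have hnd : d.keys.Nodup := pv_nodup ac _ (by simp)
  rw [PySem.Dict.values_eq_map_keys d hnd 0]
  have h1 : List.map (fun k => d.getD k 0) d.keys
      = List.map (fun k => (((pvExp ac).count k : Nat) : Int)) d.keys := by
    apply List.map_congr_left
    intro k _
    rw [hd, pv_getD_count]
    simp
  have hperm : d.keys.Perm (pvExp ac).dedup := by
    rw [List.perm_ext_iff_of_nodup hnd (List.nodup_dedup _)]
    intro a
    rw [List.mem_dedup, hd, pv_mem_keys_iff]
  have h2 : (d.keys.map (fun k => (pvExp ac).count k)).sum = (pvExp ac).length := by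
    rw [(hperm.map (fun k => (pvExp ac).count k)).sum_eq]
    exact List.sum_map_count_dedup_eq_length _
  have h3 : List.map (fun k => (((pvExp ac).count k : Nat) : Int)) d.keys
      = List.map Nat.cast (List.map (fun k => (pvExp ac).count k) d.keys) := by
    rw [List.map_map]; rfl
  rw [h1, h3, ← Nat.cast_list_sum, h2]

-- A's padding in closed form
theorem pvPad_eq (l : List String) : pvPad l = l ++ List.replicate (2 - l.length) "*1" := by
  match l with
  | [] => simp [pvPad]
  | [a] => simp [pvPad]
  | a :: b :: t =>
    rw [pvPad]
    simp

-- count in the flatMap of replicate blocks over distinct keys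
theorem pv_count_flatMap (f : String → Nat) (ks : List String) (h : ks.Nodup) (s : String) :
    (ks.flatMap (fun k => List.replicate (f k) k)).count s = if s ∈ ks then f s else 0 := by
  induction ks with
  | nil => simp
  | cons k ks ih =>
    rw [List.flatMap_cons, List.count_append, ih h.of_cons]
    by_cases hs : s = k
    · subst hs
      have hnot : s ∉ ks := (List.nodup_cons.1 h).1
      simp [hnot]
    · have : List.count s (List.replicate (f k) k) = 0 := by
        simp [List.count_replicate]
        intro hh; exact absurd hh.symm hs
      rw [this]
      by_cases hm : s ∈ ks <;> simp [hm, hs]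

theorem pv_flat_pairwise (f : String → Nat) (ks : List String)
    (h : ks.Pairwise (· < ·)) :
    (ks.flatMap (fun k => List.replicate (f k) k)).Pairwise (· ≤ ·) := by
  induction ks with
  | nil => simp
  | cons k ks ih =>
    rw [List.flatMap_cons, List.pairwise_append]
    refine ⟨?_, ih h.of_cons, ?_⟩
    · rw [List.pairwise_replicate]
      right; exact le_refl k
    · intro a ha b hb
      rw [List.eq_of_mem_replicate ha]
      rcases List.mem_flatMap.1 hb with ⟨k', hk', hb'⟩
      rw [List.eq_of_mem_replicate hb']
      exact le_of_lt (List.rel_of_pairwise_cons h hk')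

-- B's selection loop in closed form
theorem pv_collect_eq (d : PySem.Dict String Int) (hd : ∀ k, 0 ≤ d.getD k 0)
    (ks : List String) (res : List String) :
    pvCollect d ks res
      = res ++ (ks.flatMap (fun k => List.replicate (d.getD k 0).toNat k)).take (2 - res.length) := by
  induction ks generalizing res with
  | nil => simp [pvCollect]
  | cons k ks ih =>
    rw [pvCollect]
    by_cases hn : (2 : Int) - (res.length : Int) ≤ 0
    · rw [if_pos hn]
      have : 2 - res.length = 0 := by omega
      simp [this]
    · rw [if_neg hn]
      rw [ih]
      have hc := hd k
      rw [List.flatMap_cons, List.take_append, List.take_replicate]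
      have hrep : PySem.List.pyRepeat [k]
          (if d.getD k 0 < 2 - (res.length : Int) then d.getD k 0 else 2 - (res.length : Int))
          = List.replicate (min (2 - res.length) (d.getD k 0).toNat) k := by
        rw [PySem.List.pyRepeat_singleton]
        congr 1
        split_ifs with hlt <;> omega
      rw [hrep, List.append_assoc]
      congr 2
      congr 1
      simp only [List.length_append, List.length_replicate]
      omega

-- the main argument: both ports compute the first two elements of the sorted padded multiset
theorem pv_main (ac : List (String × Int)) :
    build_diplotype ac = build_diplotype_alt ac := by
  unfold build_diplotype build_diplotype_alt
  dsimp only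
  rw [pv_exp_foldl]
  set d0 : PySem.Dict String Int :=
    ac.foldl (fun d p => if p.2 > 0 then d.insert p.1 (d.getD p.1 0 + p.2) else d)
      PySem.Dict.empty with hd0
  have hd0' : d0 = ac.foldl pvStep PySem.Dict.empty := rfl
  set d2 := d0.insert "*1" (d0.getD "*1" 0 + max 0 (2 - d0.values.sum)) with hd2
  set M := pvPad (pvExp ac) with hM
  -- every lookup in d2 is a count in the padded multiset M
  have hcount : ∀ s, d2.getD s 0 = ((M.count s : Nat) : Int) := by
    intro s
    rw [hM, pvPad_eq, List.count_append]
    rw [hd2, PySem.Dict.getD_insert]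
    by_cases hs : s = "*1"
    · subst hs
      rw [if_pos rfl, hd0', pv_getD_count, pv_total]
      simp
      omega
    · rw [if_neg hs]
      have : List.count s (List.replicate (2 - (pvExp ac).length) "*1") = 0 := by
        simp [List.count_replicate]
        intro hh; exact absurd hh.symm hs
      rw [this, hd0', pv_getD_count]
      simp
  have hnd2 : d2.keys.Nodup := by
    rw [hd2]
    exact PySem.Dict.nodup_keys_insert _ _ _ (hd0' ▸ pv_nodup ac _ (by simp))
  set ks := PySem.List.sorted d2.keys (fun x => x) false with hks
  have hksnd : ks.Nodup := ((PySem.List.sorted_perm _ _ _).nodup_iff).2 hnd2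
  have hkslt : ks.Pairwise (· < ·) := by
    have hle : ks.Pairwise (fun a b => a ≤ b) := by
      have := PySem.List.sorted_pairwise (xs := d2.keys) (key := fun x => x)
      simpa using this
    exact (hle.and hksnd).imp (fun h => lt_of_le_of_ne h.1 h.2)
  set F := ks.flatMap (fun k => List.replicate (d2.getD k 0).toNat k) with hF
  -- F is a sorted rearrangement of M, so sorted(M) = F
  have hperm : F.Perm M := by
    rw [List.perm_iff_count]
    intro s
    rw [hF]
    rw [pv_count_flatMap (fun k => (d2.getD k 0).toNat) ks hksnd s]
    by_cases hm : s ∈ ks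
    · rw [if_pos hm]
      have := hcount s; omega
    · rw [if_neg hm]
      have hmk : s ∉ d2.keys := fun hh => hm ((PySem.List.mem_sorted _ _ _ _).2 hh)
      have h0 := pv_getD_of_not_mem hmk
      have := hcount s
      omega
  have hFpw : F.Pairwise (· ≤ ·) := by
    rw [hF]
    exact pv_flat_pairwise (fun k => (d2.getD k 0).toNat) ks hkslt
  have hsorted : PySem.List.sorted M (fun x => x) false = F :=
    PySem.List.sorted_id_eq_of_perm_of_pairwise M F hperm hFpw
  -- B's loop takes the first two elements of F
  have hcollect : pvCollect d2 ks [] = F.take 2 := by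
    rw [pv_collect_eq d2 (fun k => by rw [hcount k]; exact Int.natCast_nonneg _) ks []]
    simp [hF]
  rw [hsorted, hcollect]

-- ===== VERDICT (by name: the statement is the Claim_ definition above) =====
theorem build_diplotype_spec : Claim_equal_build_diplotype := by
  intro ac _
  unfold Spec_build_diplotype
  exact pv_main ac
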